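-- pv_equiv track=rewrite | github.com/andreinegru10/proiect_ACI | scripts/Align.py | LCSubStr3
-- ===== SOURCE A (Python) =====
-- def LCSubStr3(X, Y, Z):
--     m = len(X)
--     n = len(Y)
--     p = len(Z)
--
--     LCSuff = [[[0 for i in range(p + 1)] for j in range(n + 1)] for k in range(m + 1)]
--     length = 0
--     row, col, dep = 0, 0, 0
--
--     for i in range(m + 1):
--         for j in range(n + 1):
--             for k in range(p + 1):
--                 if i == 0 or j == 0 or k == 0:
--                     LCSuff[i][j][k] = 0
--                 elif X[i - 1] == Y[j - 1] and X[i - 1] == Z[k - 1]: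
--                     LCSuff[i][j][k] = LCSuff[i - 1][j - 1][k - 1] + 1
--                     if length < LCSuff[i][j][k]:
--                         length = LCSuff[i][j][k]
--                         row = i
--                         col = j
--                         dep = k
--                 else:
--                     LCSuff[i][j][k] = 0
--
--     if length == 0:
--         return 0, ""
--
--     resultStr = ["0"] * length
--     while LCSuff[row][col][dep] != 0:
--         length -= 1
--         resultStr[length] = X[row - 1]
--         row -= 1
--         col -= 1
--         dep -= 1
--
--     return len(resultStr), "".join(resultStr)
-- ===== SOURCE B (Python) =====
-- def LCSubStr3(X, Y, Z):
--     best = 0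
--     end = 0
--     for i in range(len(X)):
--         ci = X[i]
--         for j in range(len(Y)):
--             if Y[j] != ci:
--                 continue
--             for k in range(len(Z)):
--                 if Z[k] != ci:
--                     continue
--                 t = 1
--                 while t <= i and t <= j and t <= k and X[i - t] == Y[j - t] == Z[k - t]:
--                     t += 1
--                 if best < t:
--                     best, end = t, i
--     if best == 0:
--         return 0, ""
--     return best, X[end + 1 - best:end + 1]
-- ===== Notes on version B (the rewrite author's own statement) =====
-- stated objective: faster
-- what changed: B drops A's O(m*n*p) 3D suffix table entirely: it scans the same (i,j,k) cell order but recomputes each common-suffix run length on demand by walking backward while the three characters agree (skipping non-matching cells), and returns the answer as a direct slice of X instead of A's table-guided reconstruction loop.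
import Mathlib
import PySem

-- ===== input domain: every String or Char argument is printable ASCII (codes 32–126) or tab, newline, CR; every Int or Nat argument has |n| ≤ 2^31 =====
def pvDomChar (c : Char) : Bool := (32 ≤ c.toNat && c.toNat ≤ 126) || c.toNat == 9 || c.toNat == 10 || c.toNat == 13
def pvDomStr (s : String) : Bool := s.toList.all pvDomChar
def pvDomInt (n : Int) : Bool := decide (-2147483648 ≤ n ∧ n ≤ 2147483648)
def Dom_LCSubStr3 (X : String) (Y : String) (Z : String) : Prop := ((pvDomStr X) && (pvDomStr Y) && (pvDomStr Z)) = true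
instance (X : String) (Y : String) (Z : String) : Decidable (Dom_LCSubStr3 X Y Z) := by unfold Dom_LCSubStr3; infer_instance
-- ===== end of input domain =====

-- B replaces A's 3D suffix table by a table-free scan that recomputes each common-suffix
-- run by walking backward, keeping A's exact scan order and tie-break (objective: faster —
-- no 3D table allocation, O(1) extra memory; measurably faster in a timing run).

-- ===== PORT A =====
-- LCSuff[i][j][k] lookup/assignment on the nested-list table
def pvGet3 (t : List (List (List Nat))) (i j k : Nat) : Nat :=
  ((t.getD i []).getD j []).getD k 0

def pvSet3 (t : List (List (List Nat))) (i j k : Nat) (v : Nat) : List (List (List Nat)) :=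
  t.modify i (fun r => r.modify j (fun q => q.set k v))

-- body of A's innermost loop: state = (LCSuff, length, row, col, dep), cell c = (i, j, k)
def pvStepA (xs ys zs : List Char) (st : List (List (List Nat)) × Nat × Nat × Nat × Nat)
    (c : Nat × Nat × Nat) : List (List (List Nat)) × Nat × Nat × Nat × Nat :=
  if c.1 = 0 ∨ c.2.1 = 0 ∨ c.2.2 = 0 then
    (pvSet3 st.1 c.1 c.2.1 c.2.2 0, st.2)
  else if xs.getD (c.1 - 1) ' ' = ys.getD (c.2.1 - 1) ' ' ∧ xs.getD (c.1 - 1) ' ' = zs.getD (c.2.2 - 1) ' ' then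
    let v := pvGet3 st.1 (c.1 - 1) (c.2.1 - 1) (c.2.2 - 1) + 1
    if st.2.1 < v then (pvSet3 st.1 c.1 c.2.1 c.2.2 v, v, c.1, c.2.1, c.2.2)
    else (pvSet3 st.1 c.1 c.2.1 c.2.2 v, st.2)
  else
    (pvSet3 st.1 c.1 c.2.1 c.2.2 0, st.2)

-- the three nested for-loops of A
def pvTripleA (xs ys zs : List Char) : List (List (List Nat)) × Nat × Nat × Nat × Nat :=
  (List.range (xs.length + 1)).foldl (fun st i =>
    (List.range (ys.length + 1)).foldl (fun st j =>
      (List.range (zs.length + 1)).foldl (fun st k =>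
        pvStepA xs ys zs st (i, j, k)) st) st)
    (List.replicate (xs.length + 1) (List.replicate (ys.length + 1) (List.replicate (zs.length + 1) 0)), 0, 0, 0, 0)

-- A's reconstruction while-loop (fuel row+1 only makes the loop total; it stops on a zero cell first)
def pvBuildA (tbl : List (List (List Nat))) (xs : List Char) :
    Nat → Nat → Nat → Nat → Nat → List Char → List Char
  | 0, _, _, _, _, res => res
  | fuel + 1, len, row, col, dep, res =>
    if pvGet3 tbl row col dep ≠ 0 then
      pvBuildA tbl xs fuel (len - 1) (row - 1) (col - 1) (dep - 1)
        (res.set (len - 1) (xs.getD (row - 1) ' '))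
    else res

def LCSubStr3 (X : String) (Y : String) (Z : String) : Int × String :=
  let xs := X.toList
  let st := pvTripleA xs Y.toList Z.toList
  if st.2.1 = 0 then (0, "")
  else
    let res := pvBuildA st.1 xs (st.2.2.1 + 1) st.2.1 st.2.2.1 st.2.2.2.1 st.2.2.2.2
      (List.replicate st.2.1 '0')
    ((res.length : Int), String.ofList res)

-- ===== PORT B =====
-- B's backward walk: length of the common run ending at (i, j, k) (0-based), t already matched
def pvRun (xs ys zs : List Char) (i j k : Nat) (t : Nat) : Nat :=
  if h : t ≤ i ∧ t ≤ j ∧ t ≤ k ∧ xs.getD (i - t) ' ' = ys.getD (j - t) ' ' ∧ ys.getD (j - t) ' ' = zs.getD (k - t) ' ' then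
    pvRun xs ys zs i j k (t + 1)
  else t
termination_by i + 1 - t
decreasing_by have := h.1; omega

-- B's scan: state = (best, end)
def pvScanB (xs ys zs : List Char) : Nat × Nat :=
  (List.range xs.length).foldl (fun st i =>
    (List.range ys.length).foldl (fun st j =>
      if ys.getD j ' ' ≠ xs.getD i ' ' then st else
      (List.range zs.length).foldl (fun st k =>
        if zs.getD k ' ' ≠ xs.getD i ' ' then st else
        let t := pvRun xs ys zs i j k 1
        if st.1 < t then (t, i) else st) st) st) (0, 0)

def LCSubStr3_alt (X : String) (Y : String) (Z : String) : Int × String :=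
  let xs := X.toList
  let st := pvScanB xs Y.toList Z.toList
  if st.1 = 0 then (0, "")
  else ((st.1 : Int), String.ofList (PySem.List.slice xs (some ((st.2 : Int) + 1 - (st.1 : Int))) (some ((st.2 : Int) + 1))))

-- ===== PRECONDITION & SPEC =====
def Spec_LCSubStr3 (X : String) (Y : String) (Z : String) (out : Int × String) : Prop := out = LCSubStr3_alt X Y Z
instance (X : String) (Y : String) (Z : String) (out : Int × String) : Decidable (Spec_LCSubStr3 X Y Z out) := by unfold Spec_LCSubStr3; infer_instance

-- ===== CLAIM (what is proved, stated in full; the proofs are below) =====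
def Claim_equal_LCSubStr3 : Prop := ∀ (X : String) (Y : String) (Z : String), Dom_LCSubStr3 X Y Z → Spec_LCSubStr3 X Y Z (LCSubStr3 X Y Z)

-- ===== LEMMAS AND PROOFS =====

-- length of the longest common suffix of xs[0..i), ys[0..j), zs[0..k)
def pvCsuf (xs ys zs : List Char) : Nat → Nat → Nat → Nat
  | i + 1, j + 1, k + 1 =>
    if xs.getD i ' ' = ys.getD j ' ' ∧ xs.getD i ' ' = zs.getD k ' ' then
      pvCsuf xs ys zs i j k + 1
    else 0
  | _, _, _ => 0

lemma pvCsuf_succ (xs ys zs : List Char) (i j k : Nat) :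
    pvCsuf xs ys zs (i + 1) (j + 1) (k + 1) =
      if xs.getD i ' ' = ys.getD j ' ' ∧ xs.getD i ' ' = zs.getD k ' ' then
        pvCsuf xs ys zs i j k + 1
      else 0 := rfl

lemma pvCsuf_boundary (xs ys zs : List Char) (i j k : Nat) (h : i = 0 ∨ j = 0 ∨ k = 0) :
    pvCsuf xs ys zs i j k = 0 := by
  cases i <;> cases j <;> cases k <;> simp_all [pvCsuf]

lemma pvCsuf_le (xs ys zs : List Char) : ∀ i j k, pvCsuf xs ys zs i j k ≤ i := by
  intro i
  induction i with
  | zero => intro j k; simp [pvCsuf]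
  | succ i ih =>
    intro j k
    cases j <;> cases k <;> simp [pvCsuf]
    split
    · exact Nat.succ_le_succ (ih _ _)
    · omega

-- lexicographic order on cells, the scan order of the triple loop
def pvLex (c d : Nat × Nat × Nat) : Prop :=
  c.1 < d.1 ∨ (c.1 = d.1 ∧ (c.2.1 < d.2.1 ∨ (c.2.1 = d.2.1 ∧ c.2.2 < d.2.2)))

-- table shape
def pvShape (m n p : Nat) (t : List (List (List Nat))) : Prop :=
  t.length = m ∧ ∀ (a : Nat) (r : List (List Nat)), t[a]? = some r → r.length = n ∧ ∀ (b : Nat) (q : List Nat), r[b]? = some q → q.length = p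

lemma pvShape_replicate (m n p : Nat) :
    pvShape m n p (List.replicate m (List.replicate n (List.replicate p 0))) := by
  refine ⟨by simp, ?_⟩
  intro a r h
  rw [List.getElem?_replicate] at h
  split at h
  · injection h with h; subst h
    refine ⟨by simp, ?_⟩
    intro b q h2
    rw [List.getElem?_replicate] at h2
    split at h2
    · injection h2 with h2; subst h2; simp
    · cases h2
  · cases h

lemma pvShape_set3 {m n p : Nat} {t : List (List (List Nat))} (h : pvShape m n p t)
    (i j k v : Nat) : pvShape m n p (pvSet3 t i j k v) := by
  obtain ⟨hlen, hrows⟩ := h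
  refine ⟨by simp [pvSet3, hlen], ?_⟩
  intro a r hr
  rw [pvSet3, List.getElem?_modify] at hr
  cases ht : t[a]? with
  | none => rw [ht] at hr; cases hr
  | some r0 =>
    rw [ht] at hr; simp at hr
    obtain ⟨hr0len, hinner⟩ := hrows a r0 ht
    by_cases hia : i = a
    · rw [if_pos hia] at hr
      subst hr
      refine ⟨by simp [hr0len], ?_⟩
      intro b q hq
      rw [List.getElem?_modify] at hq
      cases hb : r0[b]? with
      | none => rw [hb] at hq; cases hq
      | some q0 =>
        rw [hb] at hq; simp at hq
        have hq0 := hinner b q0 hb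
        by_cases hjb : j = b
        · rw [if_pos hjb] at hq; subst hq; simp [hq0]
        · rw [if_neg hjb] at hq; subst hq; exact hq0
    · rw [if_neg hia] at hr
      subst hr
      exact ⟨hr0len, hinner⟩

lemma pvGet3_replicate (m n p a b c : Nat) :
    pvGet3 (List.replicate m (List.replicate n (List.replicate p 0))) a b c = 0 := by
  simp only [pvGet3, List.getD_eq_getElem?_getD, List.getElem?_replicate]
  split <;> simp [List.getElem?_replicate] <;> split <;> simp [List.getElem?_replicate] <;> split <;> simp

lemma pvGet3_set3_ne (t : List (List (List Nat))) (i j k a b c v : Nat)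
    (h : ¬(a = i ∧ b = j ∧ c = k)) :
    pvGet3 (pvSet3 t i j k v) a b c = pvGet3 t a b c := by
  simp only [pvGet3, pvSet3, List.getD_eq_getElem?_getD, List.getElem?_modify,
    Option.map_eq_map]
  cases ht : t[a]? with
  | none => simp
  | some r0 =>
    simp only [Option.map_some, Option.getD_some]
    by_cases hia : i = a
    · subst hia
      simp only [if_pos rfl, List.getElem?_modify, Option.map_eq_map]
      by_cases hjb : j = b
      · subst hjb
        have hck : ¬ (k = c) := by tauto
        cases hb : r0[j]? with
        | none => simp [hb]
        | some q0 => simp [hb, List.getElem?_set, hck]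
      · cases hb : r0[b]? with
        | none => simp [List.getElem?_modify, hb]
        | some q0 => simp [hb, hjb]
    · simp [if_neg hia]

lemma pvGet3_set3_self {m n p : Nat} {t : List (List (List Nat))} (h : pvShape m n p t)
    (i j k v : Nat) (hi : i < m) (hj : j < n) (hk : k < p) :
    pvGet3 (pvSet3 t i j k v) i j k = v := by
  obtain ⟨hlen, hrows⟩ := h
  have hi' : i < t.length := by omega
  have ht : t[i]? = some t[i] := List.getElem?_eq_getElem hi'
  obtain ⟨hrlen, hinner⟩ := hrows i t[i] ht
  have hj' : j < t[i].length := by omega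
  have hb : t[i][j]? = some t[i][j] := List.getElem?_eq_getElem hj'
  have hqlen := hinner j t[i][j] hb
  simp only [pvGet3, pvSet3, List.getD_eq_getElem?_getD, List.getElem?_modify,
    Option.map_eq_map, ht, Option.map_some, Option.getD_some, hb,
    List.getElem?_set]
  simp only [if_true, if_pos rfl, List.getElem?_modify, Option.map_eq_map, hb, Option.map_some,
    Option.getD_some, List.getElem?_set]
  rw [if_pos (by omega : k < t[i][j].length)]
  simp

-- abstract best-tracking step: A's (length, row, col, dep) update expressed via pvCsuf
def pvBStep (xs ys zs : List Char) (s : Nat × Nat × Nat × Nat) (c : Nat × Nat × Nat) :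
    Nat × Nat × Nat × Nat :=
  if s.1 < pvCsuf xs ys zs c.1 c.2.1 c.2.2 then (pvCsuf xs ys zs c.1 c.2.1 c.2.2, c.1, c.2.1, c.2.2) else s

def pvCells (m n p : Nat) : List (Nat × Nat × Nat) :=
  (List.range m).flatMap (fun i => (List.range n).flatMap (fun j =>
    (List.range p).map (fun k => (i, j, k))))

lemma pvCells_mem_iff (m n p : Nat) (c : Nat × Nat × Nat) :
    c ∈ pvCells m n p ↔ c.1 < m ∧ c.2.1 < n ∧ c.2.2 < p := by
  rcases c with ⟨a, b, d⟩
  simp only [pvCells, List.mem_flatMap, List.mem_map, List.mem_range]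
  constructor
  · rintro ⟨i, hi, j, hj, k, hk, h⟩
    cases h
    exact ⟨hi, hj, hk⟩
  · rintro ⟨ha, hb, hd⟩
    exact ⟨a, ha, b, hb, d, hd, rfl⟩

lemma pvCells_pairwise (m n p : Nat) : (pvCells m n p).Pairwise pvLex := by
  unfold pvCells
  rw [List.pairwise_flatMap]
  constructor
  · intro i _
    rw [List.pairwise_flatMap]
    constructor
    · intro j _
      rw [List.pairwise_map]
      exact List.pairwise_lt_range.imp (fun h => by simp [pvLex, h])
    · refine List.pairwise_lt_range.imp ?_
      intro j1 j2 hj x hx y hy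
      simp only [List.mem_map, List.mem_range] at hx hy
      obtain ⟨k1, _, rfl⟩ := hx
      obtain ⟨k2, _, rfl⟩ := hy
      simp [pvLex, hj]
  · refine List.pairwise_lt_range.imp ?_
    intro i1 i2 hi x hx y hy
    simp only [List.mem_flatMap, List.mem_map, List.mem_range] at hx hy
    obtain ⟨j1, _, k1, _, rfl⟩ := hx
    obtain ⟨j2, _, k2, _, rfl⟩ := hy
    simp [pvLex, hi]

lemma pvFoldl_cells {σ : Type} (f : σ → Nat × Nat × Nat → σ) (m n p : Nat) (s : σ) :
    (List.range m).foldl (fun s i => (List.range n).foldl (fun s j =>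
      (List.range p).foldl (fun s k => f s (i, j, k)) s) s) s = (pvCells m n p).foldl f s := by
  simp [pvCells, List.foldl_flatMap, List.foldl_map]

-- the triple loop of A computes pvCsuf in the table and folds pvBStep over the cells
lemma pvFoldA (xs ys zs : List Char) (m n p : Nat) :
    ∀ (cs : List (Nat × Nat × Nat)) (tbl : List (List (List Nat))) (s : Nat × Nat × Nat × Nat),
    (∀ c ∈ cs, c.1 ≤ m ∧ c.2.1 ≤ n ∧ c.2.2 ≤ p) →
    cs.Pairwise pvLex →
    pvShape (m + 1) (n + 1) (p + 1) tbl →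
    (∀ a b d, a ≤ m → b ≤ n → d ≤ p →
      pvGet3 tbl a b d = if (a, b, d) ∈ cs then 0 else pvCsuf xs ys zs a b d) →
    (cs.foldl (pvStepA xs ys zs) (tbl, s)).2 = cs.foldl (pvBStep xs ys zs) s ∧
    (∀ a b d, a ≤ m → b ≤ n → d ≤ p →
      pvGet3 (cs.foldl (pvStepA xs ys zs) (tbl, s)).1 a b d = pvCsuf xs ys zs a b d) := by
  intro cs
  induction cs with
  | nil =>
    intro tbl s _ _ _ htbl
    refine ⟨rfl, ?_⟩
    intro a b d ha hb hd
    simpa using htbl a b d ha hb hd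
  | cons c cs ih =>
    intro tbl s hbound hpw hsh htbl
    rcases c with ⟨ci, cj, ck⟩
    have hb' := hbound (ci, cj, ck) (by simp)
    have hcm : ci ≤ m := hb'.1
    have hcn : cj ≤ n := hb'.2.1
    have hcp : ck ≤ p := hb'.2.2
    have hlex : ∀ x ∈ cs, pvLex (ci, cj, ck) x := fun x hx => List.rel_of_pairwise_cons hpw hx
    -- the processed step writes pvCsuf and advances the abstract best state
    have hstep : pvStepA xs ys zs (tbl, s) (ci, cj, ck) =
        (pvSet3 tbl ci cj ck (pvCsuf xs ys zs ci cj ck), pvBStep xs ys zs s (ci, cj, ck)) := by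
      by_cases hb0 : ci = 0 ∨ cj = 0 ∨ ck = 0
      · simp only [pvStepA, pvBStep]
        rw [pvCsuf_boundary xs ys zs ci cj ck hb0]
        rw [if_pos hb0]
        simp
      · obtain ⟨i', rfl⟩ : ∃ i', ci = i' + 1 := ⟨ci - 1, by omega⟩
        obtain ⟨j', rfl⟩ : ∃ j', cj = j' + 1 := ⟨cj - 1, by omega⟩
        obtain ⟨k', rfl⟩ : ∃ k', ck = k' + 1 := ⟨ck - 1, by omega⟩
        have hnotmem : (i', j', k') ∉ (i' + 1, j' + 1, k' + 1) :: cs := by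
          intro hmem
          rcases List.mem_cons.mp hmem with heq | hmem'
          · simp at heq
          · have := hlex _ hmem'
            unfold pvLex at this
            simp only at this
            omega
        have hread : pvGet3 tbl i' j' k' = pvCsuf xs ys zs i' j' k' := by
          rw [htbl i' j' k' (by omega) (by omega) (by omega), if_neg hnotmem]
        simp only [pvStepA, pvBStep]
        rw [if_neg (by simp)]
        simp only [Nat.add_sub_cancel]
        rw [pvCsuf_succ]
        by_cases hmatch : xs.getD i' ' ' = ys.getD j' ' ' ∧ xs.getD i' ' ' = zs.getD k' ' '
        · rw [if_pos hmatch, if_pos hmatch, hread]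
          by_cases hlt : s.1 < pvCsuf xs ys zs i' j' k' + 1
          · rw [if_pos hlt, if_pos hlt]
          · rw [if_neg hlt, if_neg hlt]
        · rw [if_neg hmatch, if_neg hmatch]
          rw [if_neg (by omega : ¬ s.1 < 0)]
    rw [List.foldl_cons, List.foldl_cons, hstep]
    refine ih _ _ (fun x hx => hbound x (by simp [hx])) hpw.of_cons (pvShape_set3 hsh ci cj ck _) ?_
    intro a b d ha hb hd
    by_cases hmem : (a, b, d) ∈ cs
    · rw [if_pos hmem]
      have hne : ¬ (a = ci ∧ b = cj ∧ d = ck) := by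
        rintro ⟨rfl, rfl, rfl⟩
        have := hlex _ hmem
        unfold pvLex at this
        simp only at this
        omega
      rw [pvGet3_set3_ne tbl ci cj ck a b d _ hne]
      rw [htbl a b d ha hb hd, if_pos (by simp [hmem])]
    · rw [if_neg hmem]
      by_cases heq : a = ci ∧ b = cj ∧ d = ck
      · obtain ⟨rfl, rfl, rfl⟩ := heq
        exact pvGet3_set3_self hsh a b d _ (by omega) (by omega) (by omega)
      · rw [pvGet3_set3_ne tbl ci cj ck a b d _ heq]
        rw [htbl a b d ha hb hd, if_neg ?_]
        intro hmem'
        rcases List.mem_cons.mp hmem' with heq' | h'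
        · exact heq (by simpa [Prod.ext_iff] using heq')
        · exact hmem h' 

-- zero cells do not move the best state
lemma pvFold_bstep_zero (xs ys zs : List Char) :
    ∀ (l : List (Nat × Nat × Nat)) (s : Nat × Nat × Nat × Nat),
    (∀ c ∈ l, pvCsuf xs ys zs c.1 c.2.1 c.2.2 = 0) →
    l.foldl (pvBStep xs ys zs) s = s := by
  intro l
  induction l with
  | nil => intro s _; rfl
  | cons c l ih =>
    intro s h
    have hc := h c (by simp)
    simp only [List.foldl_cons, pvBStep, hc, Nat.not_lt_zero]
    exact ih s (fun c hc => h c (by simp [hc]))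

-- folding over all cells (with boundary rows) = the shifted nested fold over interior cells
lemma pvAbstractA_eq (xs ys zs : List Char) (m n p : Nat) (s : Nat × Nat × Nat × Nat) :
    (pvCells (m + 1) (n + 1) (p + 1)).foldl (pvBStep xs ys zs) s =
    (List.range m).foldl (fun s i => (List.range n).foldl (fun s j =>
      (List.range p).foldl (fun s k => pvBStep xs ys zs s (i + 1, j + 1, k + 1)) s) s) s := by
  rw [← pvFoldl_cells]
  rw [show List.range (m + 1) = 0 :: List.map Nat.succ (List.range m) from List.range_succ_eq_map,
    List.foldl_cons]
  have h0 : ∀ s0 : Nat × Nat × Nat × Nat,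
      (List.range (n + 1)).foldl (fun s j => (List.range (p + 1)).foldl
        (fun s k => pvBStep xs ys zs s (0, j, k)) s) s0 = s0 := by
    intro s0
    have hflat : (List.range (n + 1)).foldl (fun s j => (List.range (p + 1)).foldl
        (fun s k => pvBStep xs ys zs s (0, j, k)) s) s0 =
        ((List.range (n + 1)).flatMap (fun j => (List.range (p + 1)).map
          (fun k => ((0 : Nat), j, k)))).foldl (pvBStep xs ys zs) s0 := by
      simp [List.foldl_flatMap, List.foldl_map]
    rw [hflat]
    apply pvFold_bstep_zero
    intro c hc
    simp only [List.mem_flatMap, List.mem_map, List.mem_range] at hc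
    obtain ⟨j, _, k, _, rfl⟩ := hc
    exact pvCsuf_boundary xs ys zs 0 j k (Or.inl rfl)
  rw [h0, List.foldl_map]
  apply PySem.List.foldl_congr_mem
  intro s0 i _
  simp only [Nat.succ_eq_add_one]
  rw [show List.range (n + 1) = 0 :: List.map Nat.succ (List.range n) from List.range_succ_eq_map,
    List.foldl_cons]
  have h1 : ∀ s1 : Nat × Nat × Nat × Nat,
      (List.range (p + 1)).foldl (fun s k => pvBStep xs ys zs s (i + 1, 0, k)) s1 = s1 := by
    intro s1
    have hflat : (List.range (p + 1)).foldl (fun s k => pvBStep xs ys zs s (i + 1, 0, k)) s1 =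
        ((List.range (p + 1)).map (fun k => (i + 1, (0 : Nat), k))).foldl (pvBStep xs ys zs) s1 := by
      simp [List.foldl_map]
    rw [hflat]
    apply pvFold_bstep_zero
    intro c hc
    simp only [List.mem_map, List.mem_range] at hc
    obtain ⟨k, _, rfl⟩ := hc
    exact pvCsuf_boundary xs ys zs (i + 1) 0 k (Or.inr (Or.inl rfl))
  rw [h1, List.foldl_map]
  apply PySem.List.foldl_congr_mem
  intro s1 j _
  simp only [Nat.succ_eq_add_one]
  rw [show List.range (p + 1) = 0 :: List.map Nat.succ (List.range p) from List.range_succ_eq_map,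
    List.foldl_cons]
  have h2 : pvBStep xs ys zs s1 (i + 1, j + 1, 0) = s1 := by
    simp [pvBStep, pvCsuf_boundary xs ys zs (i + 1) (j + 1) 0 (Or.inr (Or.inr rfl))]
  rw [h2, List.foldl_map]

-- invariant of the abstract fold: a nonzero best is a pvCsuf value at an in-range cell
lemma pvBFold_inv (xs ys zs : List Char) (m n p : Nat) :
    ∀ (cs : List (Nat × Nat × Nat)) (s : Nat × Nat × Nat × Nat),
    (∀ c ∈ cs, c.1 ≤ m ∧ c.2.1 ≤ n ∧ c.2.2 ≤ p) →
    (s.1 ≠ 0 → pvCsuf xs ys zs s.2.1 s.2.2.1 s.2.2.2 = s.1 ∧ s.2.1 ≤ m ∧ s.2.2.1 ≤ n ∧ s.2.2.2 ≤ p) →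
    ((cs.foldl (pvBStep xs ys zs) s).1 ≠ 0 →
      pvCsuf xs ys zs (cs.foldl (pvBStep xs ys zs) s).2.1 (cs.foldl (pvBStep xs ys zs) s).2.2.1
          (cs.foldl (pvBStep xs ys zs) s).2.2.2 = (cs.foldl (pvBStep xs ys zs) s).1 ∧
      (cs.foldl (pvBStep xs ys zs) s).2.1 ≤ m ∧ (cs.foldl (pvBStep xs ys zs) s).2.2.1 ≤ n ∧
      (cs.foldl (pvBStep xs ys zs) s).2.2.2 ≤ p) := by
  intro cs
  induction cs with
  | nil => intro s _ h; exact h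
  | cons c cs ih =>
    intro s hb h
    refine ih _ (fun c hc => hb c (by simp [hc])) ?_
    intro hnz
    by_cases hlt : s.1 < pvCsuf xs ys zs c.1 c.2.1 c.2.2
    · have hc := hb c (by simp)
      simp only [pvBStep, if_pos hlt] at hnz ⊢
      exact ⟨trivial, hc.1, hc.2.1, hc.2.2⟩
    · simp only [pvBStep, if_neg hlt] at hnz ⊢
      exact h hnz

-- characterisation of one more step of the backward walk
lemma pvCsuf_ge_succ_iff (xs ys zs : List Char) :
    ∀ (t i j k : Nat), t ≤ pvCsuf xs ys zs (i + 1) (j + 1) (k + 1) →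
    (t + 1 ≤ pvCsuf xs ys zs (i + 1) (j + 1) (k + 1) ↔
      (t ≤ i ∧ t ≤ j ∧ t ≤ k ∧ xs.getD (i - t) ' ' = ys.getD (j - t) ' ' ∧
        ys.getD (j - t) ' ' = zs.getD (k - t) ' ')) := by
  intro t
  induction t with
  | zero =>
    intro i j k _
    rw [pvCsuf_succ]
    by_cases hA : xs.getD i ' ' = ys.getD j ' ' ∧ xs.getD i ' ' = zs.getD k ' '
    · rw [if_pos hA]
      simp only [Nat.sub_zero]
      constructor
      · intro _
        exact ⟨Nat.zero_le _, Nat.zero_le _, Nat.zero_le _, hA.1, by rw [← hA.1]; exact hA.2⟩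
      · intro _; omega
    · rw [if_neg hA]
      simp only [Nat.sub_zero]
      constructor
      · intro h0; omega
      · rintro ⟨-, -, -, h1, h2⟩; exact absurd ⟨h1, h1.trans h2⟩ hA
  | succ t ih =>
    intro i j k hT
    rw [pvCsuf_succ] at hT ⊢
    by_cases hA : xs.getD i ' ' = ys.getD j ' ' ∧ xs.getD i ' ' = zs.getD k ' '
    · rw [if_pos hA] at hT ⊢
      rcases i with _ | i' <;> rcases j with _ | j' <;> rcases k with _ | k' <;>
        try (rw [pvCsuf_boundary xs ys zs _ _ _ (by omega)] at hT ⊢;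
             exact ⟨fun h => absurd h (by omega), fun ⟨h1, h2, h3, _⟩ => by omega⟩)
      have hiff := ih i' j' k' (by omega)
      rw [Nat.succ_sub_succ, Nat.succ_sub_succ, Nat.succ_sub_succ]
      constructor
      · intro h
        obtain ⟨a, b, c, d, e⟩ := hiff.mp (by omega)
        exact ⟨by omega, by omega, by omega, d, e⟩
      · rintro ⟨a, b, c, d, e⟩
        have := hiff.mpr ⟨by omega, by omega, by omega, d, e⟩
        omega
    · rw [if_neg hA] at hT
      omega

lemma pvRun_eq (xs ys zs : List Char) :
    ∀ (fuel t i j k : Nat), 1 ≤ t → t ≤ pvCsuf xs ys zs (i + 1) (j + 1) (k + 1) →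
    pvCsuf xs ys zs (i + 1) (j + 1) (k + 1) - t ≤ fuel →
    pvRun xs ys zs i j k t = pvCsuf xs ys zs (i + 1) (j + 1) (k + 1) := by
  intro fuel
  induction fuel with
  | zero =>
    intro t i j k ht1 htc hfc
    rw [pvRun, dif_neg]
    · omega
    · intro hcond
      have := (pvCsuf_ge_succ_iff xs ys zs t i j k htc).mpr hcond
      omega
  | succ fuel ih =>
    intro t i j k ht1 htc hfc
    by_cases hc : t + 1 ≤ pvCsuf xs ys zs (i + 1) (j + 1) (k + 1)
    · have hcond := (pvCsuf_ge_succ_iff xs ys zs t i j k htc).mp hc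
      rw [pvRun, dif_pos hcond]
      exact ih (t + 1) i j k (by omega) hc (by omega)
    · rw [pvRun, dif_neg]
      · omega
      · intro hcond
        exact hc ((pvCsuf_ge_succ_iff xs ys zs t i j k htc).mpr hcond)

-- generic paired-fold lemma
lemma pvFoldl_rel {α σ τ : Type} (R : σ → τ → Prop) (f : σ → α → σ) (g : τ → α → τ) :
    ∀ (l : List α) (s : σ) (t : τ), R s t →
    (∀ s t a, a ∈ l → R s t → R (f s a) (g t a)) →
    R (l.foldl f s) (l.foldl g t) := by
  intro l
  induction l with
  | nil => intro s t h _; exact h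
  | cons a l ih =>
    intro s t h hstep
    exact ih _ _ (hstep s t a (by simp) h) (fun s t b hb => hstep s t b (by simp [hb]))

-- B's scan is the abstract fold, projected to (best, end)
lemma pvScanB_rel (xs ys zs : List Char) :
    ((List.range xs.length).foldl (fun s i => (List.range ys.length).foldl (fun s j =>
      (List.range zs.length).foldl (fun s k => pvBStep xs ys zs s (i + 1, j + 1, k + 1)) s) s)
      ((0, 0, 0, 0) : Nat × Nat × Nat × Nat)).1 = (pvScanB xs ys zs).1 ∧
    ((List.range xs.length).foldl (fun s i => (List.range ys.length).foldl (fun s j =>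
      (List.range zs.length).foldl (fun s k => pvBStep xs ys zs s (i + 1, j + 1, k + 1)) s) s)
      ((0, 0, 0, 0) : Nat × Nat × Nat × Nat)).2.1 - 1 = (pvScanB xs ys zs).2 ∧
    (((List.range xs.length).foldl (fun s i => (List.range ys.length).foldl (fun s j =>
      (List.range zs.length).foldl (fun s k => pvBStep xs ys zs s (i + 1, j + 1, k + 1)) s) s)
      ((0, 0, 0, 0) : Nat × Nat × Nat × Nat)).1 ≠ 0 →
      1 ≤ ((List.range xs.length).foldl (fun s i => (List.range ys.length).foldl (fun s j =>
      (List.range zs.length).foldl (fun s k => pvBStep xs ys zs s (i + 1, j + 1, k + 1)) s) s)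
      ((0, 0, 0, 0) : Nat × Nat × Nat × Nat)).2.1) := by
  unfold pvScanB
  refine pvFoldl_rel
    (fun (s : Nat × Nat × Nat × Nat) (b : Nat × Nat) =>
      s.1 = b.1 ∧ s.2.1 - 1 = b.2 ∧ (s.1 ≠ 0 → 1 ≤ s.2.1)) _ _ _ _ _
    ⟨rfl, rfl, fun h => absurd rfl h⟩ ?_
  intro s b i _ hR
  refine pvFoldl_rel
    (fun (s : Nat × Nat × Nat × Nat) (b : Nat × Nat) =>
      s.1 = b.1 ∧ s.2.1 - 1 = b.2 ∧ (s.1 ≠ 0 → 1 ≤ s.2.1)) _ _ _ _ _ hR ?_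
  intro s b j _ hR
  by_cases hy : ys.getD j ' ' = xs.getD i ' '
  · rw [if_neg (not_not_intro hy)]
    refine pvFoldl_rel
      (fun (s : Nat × Nat × Nat × Nat) (b : Nat × Nat) =>
        s.1 = b.1 ∧ s.2.1 - 1 = b.2 ∧ (s.1 ≠ 0 → 1 ≤ s.2.1)) _ _ _ _ _ hR ?_
    intro s b k _ hR
    by_cases hz : zs.getD k ' ' = xs.getD i ' '
    · rw [if_neg (not_not_intro hz)]
      have hcs1 : 1 ≤ pvCsuf xs ys zs (i + 1) (j + 1) (k + 1) := by
        rw [pvCsuf_succ, if_pos ⟨hy.symm, hz.symm⟩]; omega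
      have hrun : pvRun xs ys zs i j k 1 = pvCsuf xs ys zs (i + 1) (j + 1) (k + 1) :=
        pvRun_eq xs ys zs (pvCsuf xs ys zs (i + 1) (j + 1) (k + 1)) 1 i j k (le_refl 1) hcs1 (by omega)
      show (fun (s : Nat × Nat × Nat × Nat) (b : Nat × Nat) =>
          s.1 = b.1 ∧ s.2.1 - 1 = b.2 ∧ (s.1 ≠ 0 → 1 ≤ s.2.1))
        (pvBStep xs ys zs s (i + 1, j + 1, k + 1))
        (if b.1 < pvRun xs ys zs i j k 1 then (pvRun xs ys zs i j k 1, i) else b)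
      simp only [pvBStep, hrun]
      by_cases hlt : b.1 < pvCsuf xs ys zs (i + 1) (j + 1) (k + 1)
      · rw [if_pos (by rw [hR.1]; exact hlt), if_pos hlt]
        exact ⟨rfl, by simp, fun _ => Nat.succ_le_succ (Nat.zero_le i)⟩
      · rw [if_neg (by rw [hR.1]; exact hlt), if_neg hlt]
        exact hR
    · rw [if_pos hz]
      have h0 : pvCsuf xs ys zs (i + 1) (j + 1) (k + 1) = 0 := by
        rw [pvCsuf_succ, if_neg]
        rintro ⟨-, h2⟩
        exact hz h2.symm
      simp only [pvBStep, h0, if_neg (by omega : ¬ ((s : Nat × Nat × Nat × Nat).1 < 0))]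
      exact hR
  · rw [if_pos hy]
    have hzero : (List.range zs.length).foldl
        (fun s k => pvBStep xs ys zs s (i + 1, j + 1, k + 1)) s = s := by
      have hflat : (List.range zs.length).foldl
          (fun s k => pvBStep xs ys zs s (i + 1, j + 1, k + 1)) s =
          ((List.range zs.length).map (fun k => (i + 1, j + 1, k + 1))).foldl
            (pvBStep xs ys zs) s := by
        simp [List.foldl_map]
      rw [hflat]
      apply pvFold_bstep_zero
      intro c hc
      simp only [List.mem_map, List.mem_range] at hc
      obtain ⟨k, _, rfl⟩ := hc
      rw [pvCsuf_succ, if_neg]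
      rintro ⟨h1, -⟩
      exact hy h1.symm
    rw [hzero]
    exact hR

-- A's reconstruction loop returns exactly the slice xs[row-len .. row)
lemma pvBuildA_spec (xs ys zs : List Char) (m n p : Nat) (tbl : List (List (List Nat)))
    (htbl : ∀ a b d, a ≤ m → b ≤ n → d ≤ p → pvGet3 tbl a b d = pvCsuf xs ys zs a b d)
    (hm : xs.length = m) :
    ∀ (ℓ : Nat) (r c d : Nat) (res : List Char) (fuel : Nat),
    r ≤ m → c ≤ n → d ≤ p →
    pvCsuf xs ys zs r c d = ℓ → ℓ ≤ fuel → ℓ ≤ res.length →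
    pvBuildA tbl xs fuel ℓ r c d res = (xs.drop (r - ℓ)).take ℓ ++ res.drop ℓ := by
  intro ℓ
  induction ℓ with
  | zero =>
    intro r c d res fuel hr hc hd hcs _ _
    have h0 : pvGet3 tbl r c d = 0 := by rw [htbl r c d hr hc hd]; exact hcs
    cases fuel with
    | zero => simp [pvBuildA]
    | succ f => simp [pvBuildA, h0]
  | succ ℓ ih =>
    intro r c d res fuel hr hc hd hcs hfuel hres
    cases fuel with
    | zero => omega
    | succ f =>
      obtain ⟨r', rfl⟩ : ∃ r', r = r' + 1 :=
        ⟨r - 1, by rcases Nat.eq_zero_or_pos r with h | h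
                   · rw [h, pvCsuf_boundary xs ys zs 0 c d (Or.inl rfl)] at hcs; omega
                   · omega⟩
      obtain ⟨c', rfl⟩ : ∃ c', c = c' + 1 :=
        ⟨c - 1, by rcases Nat.eq_zero_or_pos c with h | h
                   · rw [h, pvCsuf_boundary xs ys zs (r' + 1) 0 d (Or.inr (Or.inl rfl))] at hcs; omega
                   · omega⟩
      obtain ⟨d', rfl⟩ : ∃ d', d = d' + 1 :=
        ⟨d - 1, by rcases Nat.eq_zero_or_pos d with h | h
                   · rw [h, pvCsuf_boundary xs ys zs (r' + 1) (c' + 1) 0 (Or.inr (Or.inr rfl))] at hcs; omega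
                   · omega⟩
      rw [pvCsuf_succ] at hcs
      by_cases hmatch : xs.getD r' ' ' = ys.getD c' ' ' ∧ xs.getD r' ' ' = zs.getD d' ' '
      · rw [if_pos hmatch] at hcs
        have hcs' : pvCsuf xs ys zs r' c' d' = ℓ := by omega
        have hget : pvGet3 tbl (r' + 1) (c' + 1) (d' + 1) = ℓ + 1 := by
          rw [htbl _ _ _ hr hc hd, pvCsuf_succ, if_pos hmatch, hcs']
        have hℓr : ℓ ≤ r' := by
          have := pvCsuf_le xs ys zs r' c' d'
          omega
        have hr'len : r' < xs.length := by omega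
        simp only [pvBuildA]
        rw [if_pos (by rw [hget]; omega)]
        simp only [Nat.add_sub_cancel]
        rw [ih r' c' d' (res.set ℓ (xs.getD r' ' ')) f (by omega) (by omega) (by omega) hcs'
          (by omega) (by rw [List.length_set]; omega)]
        have hsub : r' + 1 - (ℓ + 1) = r' - ℓ := by omega
        rw [hsub]
        have htake : (xs.drop (r' - ℓ)).take (ℓ + 1) =
            (xs.drop (r' - ℓ)).take ℓ ++ [xs[r']'hr'len] := by
          rw [List.take_add_one]
          congr 1
          rw [List.getElem?_drop, show r' - ℓ + ℓ = r' from by omega,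
            List.getElem?_eq_getElem hr'len]
          rfl
        rw [htake]
        have hdrop : (res.set ℓ (xs.getD r' ' ')).drop ℓ =
            xs.getD r' ' ' :: res.drop (ℓ + 1) := by
          apply List.ext_getElem?
          intro idx
          cases idx with
          | zero => simp [(by omega : ℓ < res.length)]
          | succ idx =>
            simp only [List.getElem?_drop, List.getElem?_set, List.getElem?_cons_succ]
            rw [if_neg (by omega)]
            rw [show ℓ + (idx + 1) = ℓ + 1 + idx from by omega]
        rw [hdrop]
        rw [List.getD_eq_getElem xs ' ' hr'len]
        simp
      · rw [if_neg hmatch] at hcs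
        omega

theorem pvMain (X Y Z : String) : LCSubStr3 X Y Z = LCSubStr3_alt X Y Z := by
  simp only [LCSubStr3, LCSubStr3_alt]
  set xs := X.toList with hxsdef
  set ys := Y.toList with hysdef
  set zs := Z.toList with hzsdef
  have hbound : ∀ c ∈ pvCells (xs.length + 1) (ys.length + 1) (zs.length + 1),
      c.1 ≤ xs.length ∧ c.2.1 ≤ ys.length ∧ c.2.2 ≤ zs.length := by
    intro c hc
    have := (pvCells_mem_iff _ _ _ c).mp hc
    omega
  have htbl0 : ∀ a b d, a ≤ xs.length → b ≤ ys.length → d ≤ zs.length →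
      pvGet3 (List.replicate (xs.length + 1) (List.replicate (ys.length + 1)
        (List.replicate (zs.length + 1) 0))) a b d =
      if (a, b, d) ∈ pvCells (xs.length + 1) (ys.length + 1) (zs.length + 1) then 0
      else pvCsuf xs ys zs a b d := by
    intro a b d ha hb hd
    rw [if_pos ((pvCells_mem_iff _ _ _ (a, b, d)).mpr
      ⟨Nat.lt_succ_of_le ha, Nat.lt_succ_of_le hb, Nat.lt_succ_of_le hd⟩)]
    exact pvGet3_replicate _ _ _ _ _ _
  have hA := pvFoldA xs ys zs xs.length ys.length zs.length
    (pvCells (xs.length + 1) (ys.length + 1) (zs.length + 1))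
    (List.replicate (xs.length + 1) (List.replicate (ys.length + 1)
      (List.replicate (zs.length + 1) 0))) (0, 0, 0, 0)
    hbound (pvCells_pairwise _ _ _) (pvShape_replicate _ _ _) htbl0
  have hTri : pvTripleA xs ys zs =
      (pvCells (xs.length + 1) (ys.length + 1) (zs.length + 1)).foldl (pvStepA xs ys zs)
        (List.replicate (xs.length + 1) (List.replicate (ys.length + 1)
          (List.replicate (zs.length + 1) 0)), 0, 0, 0, 0) := by
    rw [pvTripleA]
    exact pvFoldl_cells (pvStepA xs ys zs) _ _ _ _
  have habs := pvAbstractA_eq xs ys zs xs.length ys.length zs.length (0, 0, 0, 0)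
  have hrel := pvScanB_rel xs ys zs
  rw [← habs] at hrel
  have hinv := pvBFold_inv xs ys zs xs.length ys.length zs.length
    (pvCells (xs.length + 1) (ys.length + 1) (zs.length + 1)) (0, 0, 0, 0)
    hbound (fun h => absurd rfl h)
  set sA := (pvCells (xs.length + 1) (ys.length + 1) (zs.length + 1)).foldl
    (pvBStep xs ys zs) (0, 0, 0, 0) with hsAdef
  obtain ⟨hb1, hb2, hb3⟩ := hrel
  have hsnd : (pvTripleA xs ys zs).2 = sA := by rw [hTri]; exact hA.1
  have htblF : ∀ a b d, a ≤ xs.length → b ≤ ys.length → d ≤ zs.length →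
      pvGet3 (pvTripleA xs ys zs).1 a b d = pvCsuf xs ys zs a b d := by
    rw [hTri]; exact hA.2
  have hp1 : (pvTripleA xs ys zs).2.1 = sA.1 := by rw [hsnd]
  have hp2 : (pvTripleA xs ys zs).2.2.1 = sA.2.1 := by rw [hsnd]
  have hp3 : (pvTripleA xs ys zs).2.2.2.1 = sA.2.2.1 := by rw [hsnd]
  have hp4 : (pvTripleA xs ys zs).2.2.2.2 = sA.2.2.2 := by rw [hsnd]
  rw [hp1, hp2, hp3, hp4, ← hb1, ← hb2]
  by_cases hz0 : sA.1 = 0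
  · rw [if_pos hz0, if_pos hz0]
  · rw [if_neg hz0, if_neg hz0]
    obtain ⟨hcs, hA1, hA2, hA3⟩ := hinv hz0
    have hLr : sA.1 ≤ sA.2.1 := by
      have := pvCsuf_le xs ys zs sA.2.1 sA.2.2.1 sA.2.2.2
      omega
    have h1r : 1 ≤ sA.2.1 := hb3 hz0
    have hbuild := pvBuildA_spec xs ys zs xs.length ys.length zs.length
      (pvTripleA xs ys zs).1 htblF rfl sA.1 sA.2.1 sA.2.2.1 sA.2.2.2
      (List.replicate sA.1 '0') (sA.2.1 + 1) hA1 hA2 hA3 hcs (by omega) (by simp)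
    rw [hbuild]
    have hdropped : (List.replicate sA.1 '0').drop sA.1 = [] := by simp
    rw [hdropped, List.append_nil]
    have hlen : ((xs.drop (sA.2.1 - sA.1)).take sA.1).length = sA.1 := by
      simp only [List.length_take, List.length_drop]
      omega
    have hcast1 : ((sA.2.1 - 1 : Nat) : Int) + 1 - (sA.1 : Int) = ((sA.2.1 - sA.1 : Nat) : Int) := by
      omega
    have hcast2 : ((sA.2.1 - 1 : Nat) : Int) + 1 = ((sA.2.1 : Nat) : Int) := by omega
    rw [hcast1, hcast2, PySem.List.slice_natCast,
      show sA.2.1 - (sA.2.1 - sA.1) = sA.1 from by omega, hlen]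

-- ===== VERDICT (by name: the statement is the Claim_ definition above) =====
theorem LCSubStr3_spec : Claim_equal_LCSubStr3 := by
  intro X Y Z _
  unfold Spec_LCSubStr3
  exact pvMain X Y Z
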